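-- pv_equiv track=rewrite | github.com/pypi-data/pypi-mirror-404 | packages/honeyhive-bundled/honeyhive_bundled-1.0.0.tar.gz/honeyhive_bundled-1.0.0/scripts/check-documentation-compliance.py | is_docs_only_commit
-- ===== SOURCE A (Python) =====
-- def is_docs_only_commit(staged_files: list) -> bool:
--     """Check if this is a documentation-only commit."""
--     doc_patterns = ["docs/", "README.md", ".praxis-os/"]
--     non_doc_patterns = ["src/", "tests/", "examples/", "scripts/"]
--
--     has_docs = any(
--         file_path.startswith(pattern)
--         for file_path in staged_files
--         for pattern in doc_patterns
--     )
--     has_non_docs = any(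
--         file_path.startswith(pattern)
--         for file_path in staged_files
--         for pattern in non_doc_patterns
--     )
--
--     return has_docs and not has_non_docs
-- ===== SOURCE B (Python) =====
-- def is_docs_only_commit(staged_files: list) -> bool:
--     """Check if this is a documentation-only commit (single pass, early exit)."""
--     doc_patterns = ("docs/", "README.md", ".praxis-os/")
--     non_doc_patterns = ("src/", "tests/", "examples/", "scripts/")
--
--     has_docs = False
--     for file_path in staged_files:
--         if file_path.startswith(non_doc_patterns):
--             # a non-doc file fixes the verdict to False
--             return False
--         if file_path.startswith(doc_patterns):
--             has_docs = True
--     return has_docs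
-- ===== Notes on version B (the rewrite author's own statement) =====
-- stated objective: faster
-- what changed: Replaces the two separate any() generator scans over the whole list with one single-pass loop that returns False immediately at the first non-doc file and otherwise accumulates has_docs, using startswith's tuple form.
import Mathlib
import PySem

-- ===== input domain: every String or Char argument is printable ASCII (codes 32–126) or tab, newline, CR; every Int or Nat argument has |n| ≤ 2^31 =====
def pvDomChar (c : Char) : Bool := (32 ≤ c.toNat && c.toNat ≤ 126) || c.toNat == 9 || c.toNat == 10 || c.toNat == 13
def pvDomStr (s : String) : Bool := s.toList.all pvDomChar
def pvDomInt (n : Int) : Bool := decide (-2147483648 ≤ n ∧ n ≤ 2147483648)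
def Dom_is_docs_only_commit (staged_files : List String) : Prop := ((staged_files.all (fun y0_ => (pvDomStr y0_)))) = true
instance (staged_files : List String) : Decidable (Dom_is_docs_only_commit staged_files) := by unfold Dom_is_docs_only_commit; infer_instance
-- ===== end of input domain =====

-- B: one single-pass loop with early exit instead of A's two full any() scans; same result everywhere.
-- ===== PORT A =====
def pvDocPatterns : List String := ["docs/", "README.md", ".praxis-os/"]
def pvNonDocPatterns : List String := ["src/", "tests/", "examples/", "scripts/"]

def is_docs_only_commit (staged_files : List String) : Bool :=
  let has_docs := staged_files.any (fun file_path =>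
    pvDocPatterns.any (fun pattern => PySem.Str.startswith file_path pattern))
  let has_non_docs := staged_files.any (fun file_path =>
    pvNonDocPatterns.any (fun pattern => PySem.Str.startswith file_path pattern))
  has_docs && !has_non_docs

-- ===== PORT B =====
-- the loop of Source B: early `return False` on a non-doc prefix, accumulator has_docs otherwise
def pvGoB (has_docs : Bool) : List String → Bool
  | [] => has_docs
  | file_path :: rest =>
    if pvNonDocPatterns.any (fun p => PySem.Str.startswith file_path p) then false
    else pvGoB (has_docs || pvDocPatterns.any (fun p => PySem.Str.startswith file_path p)) rest

def is_docs_only_commit_alt (staged_files : List String) : Bool :=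
  pvGoB false staged_files

-- ===== PRECONDITION & SPEC =====
def Spec_is_docs_only_commit (staged_files : List String) (out : Bool) : Prop := out = is_docs_only_commit_alt staged_files
instance (staged_files : List String) (out : Bool) : Decidable (Spec_is_docs_only_commit staged_files out) := by unfold Spec_is_docs_only_commit; infer_instance

-- ===== CLAIM (what is proved, stated in full; the proofs are below) =====
def Claim_equal_is_docs_only_commit : Prop := ∀ (staged_files : List String), Dom_is_docs_only_commit staged_files → Spec_is_docs_only_commit staged_files (is_docs_only_commit staged_files)

-- ===== LEMMAS AND PROOFS =====

-- ===== VERDICT (by name: the statement is the Claim_ definition above) =====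
theorem pvGoB_eq (acc : Bool) (l : List String) :
    pvGoB acc l =
      ((acc || l.any (fun f => pvDocPatterns.any (fun p => PySem.Str.startswith f p)))
        && !(l.any (fun f => pvNonDocPatterns.any (fun p => PySem.Str.startswith f p)))) := by
  induction l generalizing acc with
  | nil => simp [pvGoB]
  | cons f rest ih =>
    simp only [pvGoB, List.any_cons]
    split
    · rename_i h
      simp only [h, Bool.true_or, Bool.not_true, Bool.and_false]
    · rename_i h
      simp only [Bool.not_eq_true] at h
      rw [ih]
      simp only [h, Bool.false_or, Bool.or_assoc]

theorem is_docs_only_commit_spec : Claim_equal_is_docs_only_commit := by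
  intro staged_files _
  unfold Spec_is_docs_only_commit is_docs_only_commit is_docs_only_commit_alt
  rw [pvGoB_eq]
  simp
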